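-- pv_equiv track=rewrite | github.com/cgcardona/muse | muse/plugins/code/_callgraph.py | transitive_callers
-- ===== SOURCE A (Python) =====
-- ReverseGraph = dict[str, list[str]]
--
-- def transitive_callers(
--     start_name: str,
--     reverse: ReverseGraph,
--     max_depth: int = 0,
-- ) -> dict[int, list[str]]:
--     """BFS through *reverse* to find all transitive callers of *start_name*.
--
--     Args:
--         start_name: Bare function/method name to start from.
--         reverse:    Reverse call graph produced by :func:`build_reverse_graph`.
--         max_depth:  Maximum BFS depth.  ``0`` means unlimited.
--
--     Returns:
--         ``{depth: [caller_address, ...]}``, depth 1 = direct callers.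
--         Addresses that appear at multiple depths are recorded only at the
--         shallowest depth (first encounter wins).
--     """
--     result: dict[int, list[str]] = {}
--     visited_names: set[str] = {start_name}
--     visited_addrs: set[str] = set()
--     # Queue items: (callee_bare_name, depth)
--     queue: list[tuple[str, int]] = [(start_name, 0)]
--
--     while queue:
--         name, depth = queue.pop(0)
--         if max_depth > 0 and depth >= max_depth:
--             continue
--         next_depth = depth + 1
--         for caller_addr in reverse.get(name, []):
--             if caller_addr in visited_addrs:
--                 continue
--             visited_addrs.add(caller_addr)
--             result.setdefault(next_depth, []).append(caller_addr)
--             # Extract the bare name of the caller to continue BFS.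
--             caller_name = caller_addr.split("::")[-1].split(".")[-1]
--             if caller_name not in visited_names:
--                 visited_names.add(caller_name)
--                 queue.append((caller_name, next_depth))
--
--     return result
-- ===== SOURCE B (Python) =====
-- def transitive_callers(start_name, reverse, max_depth=0):
--     """Recursive level decomposition: each call computes one BFS level and
--     recurses on the fresh names; the depth-keyed dict is built only at the
--     end from the list of levels."""
--     def levels(frontier, seen_names, seen_addrs, remaining):
--         addrs, names = [], []
--         for name in frontier:
--             for addr in reverse.get(name, []):
--                 if addr not in seen_addrs:
--                     seen_addrs.add(addr)
--                     addrs.append(addr)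
--                     n = addr.split("::")[-1].split(".")[-1]
--                     if n not in seen_names:
--                         seen_names.add(n)
--                         names.append(n)
--         if not addrs:
--             return []
--         if remaining == 1:
--             return [addrs]
--         return [addrs] + levels(names, seen_names, seen_addrs, remaining - 1)
--
--     lv = levels([start_name], {start_name}, set(), max_depth)
--     return {d: addrs for d, addrs in enumerate(lv, start=1)}
-- ===== Notes on version B (the rewrite author's own statement) =====
-- stated objective: alternative
-- what changed: Replaces A's single imperative while-loop over a FIFO queue of (name, depth) pairs that mutates a result dict via setdefault by a recursive per-level decomposition: a recursive function computes one level's fresh addresses and recurses on the fresh names, returning a plain list of levels, and the depth-keyed dict is built only at the end with enumerate(..., start=1).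
import Mathlib
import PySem

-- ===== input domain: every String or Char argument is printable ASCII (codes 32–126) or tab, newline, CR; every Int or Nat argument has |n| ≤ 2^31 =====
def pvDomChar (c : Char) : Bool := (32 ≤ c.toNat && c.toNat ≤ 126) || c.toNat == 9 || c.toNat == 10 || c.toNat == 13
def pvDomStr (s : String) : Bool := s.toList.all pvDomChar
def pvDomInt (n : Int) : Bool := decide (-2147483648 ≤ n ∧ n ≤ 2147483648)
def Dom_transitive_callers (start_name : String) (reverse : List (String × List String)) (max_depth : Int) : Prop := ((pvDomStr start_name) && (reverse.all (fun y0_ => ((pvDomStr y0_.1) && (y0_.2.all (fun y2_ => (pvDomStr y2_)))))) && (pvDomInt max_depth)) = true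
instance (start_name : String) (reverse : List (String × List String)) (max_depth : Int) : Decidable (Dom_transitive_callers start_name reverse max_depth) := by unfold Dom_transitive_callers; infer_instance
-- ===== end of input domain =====

-- B replaces A's queue-driven while loop (and its setdefault-mutated result dict) by a
-- recursive per-level function returning a list of levels, enumerated into the dict at the end.

-- ===== PORT A =====
-- caller_addr.split("::")[-1].split(".")[-1]  (split? is `some` since the separators are nonempty;
-- the [-1] defaults are never hit: split always yields a nonempty list)
def pvName (a : String) : String :=
  PySem.List.pyGetD
    ((PySem.Str.split? (PySem.List.pyGetD ((PySem.Str.split? a "::").getD []) (-1) "") ".").getD [])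
    (-1) ""

-- fuel bound for both loops (a pure totality guard, provably sufficient:
-- every queue push / recursion level consumes fresh bare names derived from addresses)
def pvFuel (reverse : List (String × List String)) : Nat :=
  ((reverse.map (fun p => p.2)).flatten).length + 1

-- the `for caller_addr in reverse.get(name, [])` body of A (state: result, visited_names, visited_addrs, queue)
def pvInnerA (d1 : Int) :
    List String → PySem.Dict Int (List String) → PySem.Set String → PySem.Set String →
    List (String × Int) →
    PySem.Dict Int (List String) × PySem.Set String × PySem.Set String × List (String × Int)
  | [], r, vn, va, q => (r, vn, va, q)
  | addr :: cs, r, vn, va, q =>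
    if PySem.Set.contains va addr then pvInnerA d1 cs r vn va q
    else
      let va' := PySem.Set.add va addr
      let r' := r.modify d1 [] (fun l => l ++ [addr])
      let n := pvName addr
      if PySem.Set.contains vn n then pvInnerA d1 cs r' vn va' q
      else pvInnerA d1 cs r' (PySem.Set.add vn n) va' (q ++ [(n, d1)])

-- A's `while queue:` loop; pops the front, skips items at depth ≥ max_depth, else expands
def pvLoopA (rd : PySem.Dict String (List String)) (md : Int) :
    Nat → PySem.Dict Int (List String) → PySem.Set String → PySem.Set String →
    List (String × Int) → PySem.Dict Int (List String)
  | _, r, _, _, [] => r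
  | 0, r, _, _, _ :: _ => r
  | f + 1, r, vn, va, (name, depth) :: q =>
    if md > 0 ∧ depth ≥ md then pvLoopA rd md f r vn va q
    else
      match pvInnerA (depth + 1) (rd.getD name []) r vn va q with
      | (r', vn', va', q') => pvLoopA rd md f r' vn' va' q'

def transitive_callers (start_name : String) (reverse : List (String × List String)) (max_depth : Int) : List (Int × List String) :=
  (pvLoopA (PySem.Dict.mk reverse) max_depth (pvFuel reverse)
    PySem.Dict.empty (PySem.Set.ofList [start_name]) PySem.Set.empty [(start_name, 0)]).items

-- ===== PORT B =====
-- B's inner `for addr in reverse.get(name, []):` loop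
-- (state: seen_names, seen_addrs, addrs accumulator, names accumulator)
def pvInnerC :
    List String → PySem.Set String → PySem.Set String → List String → List String →
    PySem.Set String × PySem.Set String × List String × List String
  | [], sn, sa, addrs, nms => (sn, sa, addrs, nms)
  | a :: cs, sn, sa, addrs, nms =>
    if PySem.Set.contains sa a then pvInnerC cs sn sa addrs nms
    else
      let sa' := PySem.Set.add sa a
      let addrs' := addrs ++ [a]
      let n := pvName a
      if PySem.Set.contains sn n then pvInnerC cs sn sa' addrs' nms
      else pvInnerC cs (PySem.Set.add sn n) sa' addrs' (nms ++ [n])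

-- B's outer `for name in frontier:` loop of one level
def pvGather (rd : PySem.Dict String (List String)) :
    List String → PySem.Set String → PySem.Set String → List String → List String →
    PySem.Set String × PySem.Set String × List String × List String
  | [], sn, sa, addrs, nms => (sn, sa, addrs, nms)
  | name :: rest, sn, sa, addrs, nms =>
    match pvInnerC (rd.getD name []) sn sa addrs nms with
    | (sn', sa', addrs', nms') => pvGather rd rest sn' sa' addrs' nms'

-- B's recursive `levels`: one level's addresses, then recurse on the fresh names
def pvLevels (rd : PySem.Dict String (List String)) :
    Nat → List String → PySem.Set String → PySem.Set String → Int → List (List String)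
  | 0, _, _, _, _ => []
  | f + 1, frontier, sn, sa, remaining =>
    match pvGather rd frontier sn sa [] [] with
    | (sn', sa', addrs, nms) =>
      if addrs.isEmpty then []
      else if remaining = 1 then [addrs]
      else addrs :: pvLevels rd f nms sn' sa' (remaining - 1)

-- {d: addrs for d, addrs in enumerate(lv, start=1)}
def transitive_callers_alt (start_name : String) (reverse : List (String × List String)) (max_depth : Int) : List (Int × List String) :=
  ((PySem.List.enumerate
      (pvLevels (PySem.Dict.mk reverse) (pvFuel reverse) [start_name]
        (PySem.Set.ofList [start_name]) PySem.Set.empty max_depth) 1).foldl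
    (fun d p => d.insert p.1 p.2) PySem.Dict.empty).items

-- ===== PRECONDITION & SPEC =====
def Spec_transitive_callers (start_name : String) (reverse : List (String × List String)) (max_depth : Int) (out : List (Int × List String)) : Prop := out = transitive_callers_alt start_name reverse max_depth
instance (start_name : String) (reverse : List (String × List String)) (max_depth : Int) (out : List (Int × List String)) : Decidable (Spec_transitive_callers start_name reverse max_depth out) := by unfold Spec_transitive_callers; infer_instance

-- ===== CLAIM (what is proved, stated in full; the proofs are below) =====
def Claim_equal_transitive_callers : Prop := ∀ (start_name : String) (reverse : List (String × List String)) (max_depth : Int), Dom_transitive_callers start_name reverse max_depth → Spec_transitive_callers start_name reverse max_depth (transitive_callers start_name reverse max_depth)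

-- ===== LEMMAS AND PROOFS =====

-- a measure: addresses in the graph whose bare name has not been visited yet
def pvCnt (rd : PySem.Dict String (List String)) (vn : PySem.Set String) : Nat :=
  ((rd.values.flatten).filter (fun a => !(PySem.Set.contains vn (pvName a)))).length

-- B's inner loop only appends to its two accumulators
theorem pvInnerC_acc (cs : List String) :
    ∀ sn sa addrs nms, pvInnerC cs sn sa addrs nms =
      ((pvInnerC cs sn sa [] []).1, (pvInnerC cs sn sa [] []).2.1,
       addrs ++ (pvInnerC cs sn sa [] []).2.2.1, nms ++ (pvInnerC cs sn sa [] []).2.2.2) := by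
  induction cs with
  | nil => intro sn sa addrs nms; simp [pvInnerC]
  | cons a cs ih =>
    intro sn sa addrs nms
    simp only [pvInnerC]
    split_ifs with h1 h2
    · exact ih sn sa addrs nms
    · rw [ih _ _ (addrs ++ [a]) nms, ih _ _ ([] ++ [a]) []]
      simp
    · rw [ih _ _ (addrs ++ [a]) (nms ++ [pvName a]), ih _ _ ([] ++ [a]) ([] ++ [pvName a])]
      simp

-- B's level loop only appends to its two accumulators
theorem pvGather_acc (rd : PySem.Dict String (List String)) (F : List String) :
    ∀ sn sa addrs nms, pvGather rd F sn sa addrs nms =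
      ((pvGather rd F sn sa [] []).1, (pvGather rd F sn sa [] []).2.1,
       addrs ++ (pvGather rd F sn sa [] []).2.2.1, nms ++ (pvGather rd F sn sa [] []).2.2.2) := by
  induction F with
  | nil => intro sn sa addrs nms; simp [pvGather]
  | cons name rest ih =>
    intro sn sa addrs nms
    simp only [pvGather]
    rw [pvInnerC_acc _ _ _ addrs nms, pvInnerC_acc _ _ _ [] []]
    rw [ih _ _ (addrs ++ _) (nms ++ _), ih _ _ ([] ++ _) ([] ++ _)]
    simp

-- A's inner loop is B's inner loop with the addresses folded into the result dict
-- and the produced names tagged with their depth and queued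
theorem pvInner_rel (d1 : Int) (cs : List String) :
    ∀ r vn va q, pvInnerA d1 cs r vn va q =
      (List.foldl (fun r a => r.modify d1 [] (fun l => l ++ [a])) r (pvInnerC cs vn va [] []).2.2.1,
       (pvInnerC cs vn va [] []).1, (pvInnerC cs vn va [] []).2.1,
       q ++ ((pvInnerC cs vn va [] []).2.2.2.map (fun n => (n, d1)))) := by
  induction cs with
  | nil => intro r vn va q; simp [pvInnerA, pvInnerC]
  | cons addr cs ih =>
    intro r vn va q
    simp only [pvInnerA, pvInnerC]
    split_ifs with h1 h2
    · exact ih r vn va q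
    · rw [ih _ _ _ q, pvInnerC_acc cs _ _ ([] ++ [addr]) []]
      simp
    · rw [ih _ _ _ (q ++ [(pvName addr, d1)]),
          pvInnerC_acc cs _ _ ([] ++ [addr]) ([] ++ [pvName addr])]
      simp

-- skipping a whole level: each popped item at depth ≥ max_depth costs one pop and does nothing
theorem pvLoopA_drain_skip (rd : PySem.Dict String (List String)) (md : Int) (d : Int)
    (hstop : ¬ (md ≤ 0 ∨ d < md)) (F : List String) :
    ∀ g r vn va, pvLoopA rd md (F.length + g) r vn va (F.map (fun n => (n, d))) = r := by
  induction F with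
  | nil => intro g r vn va; cases g <;> simp [pvLoopA]
  | cons name rest ih =>
    intro g r vn va
    have : (name :: rest).length + g = (rest.length + g) + 1 := by simp [Nat.succ_add]
    rw [this]
    simp only [List.map_cons, pvLoopA]
    rw [if_pos (by omega)]
    exact ih g r vn va

-- processing a whole level: A pops the frontier items one by one, queueing pushes behind M;
-- that is B's gather, with the gathered addresses folded into the result dict
theorem pvLoopA_drain_go (rd : PySem.Dict String (List String)) (md : Int) (d : Int)
    (hgo : md ≤ 0 ∨ d < md) (F : List String) :
    ∀ g r vn va M,
      pvLoopA rd md (F.length + g) r vn va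
        (F.map (fun n => (n, d)) ++ M.map (fun n => (n, d + 1))) =
      pvLoopA rd md g
        (List.foldl (fun r a => r.modify (d + 1) [] (fun l => l ++ [a])) r
          (pvGather rd F vn va [] []).2.2.1)
        (pvGather rd F vn va [] []).1 (pvGather rd F vn va [] []).2.1
        ((M ++ (pvGather rd F vn va [] []).2.2.2).map (fun n => (n, d + 1))) := by
  induction F with
  | nil => intro g r vn va M; simp [pvGather]
  | cons name rest ih =>
    intro g r vn va M
    have hl : (name :: rest).length + g = (rest.length + g) + 1 := by simp [Nat.succ_add]
    rw [hl]
    simp only [List.map_cons, List.cons_append, pvLoopA]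
    rw [if_neg (by omega)]
    rw [pvInner_rel]
    simp only [pvGather]
    rw [pvGather_acc rd rest _ _ _ _]
    have := ih g (List.foldl (fun r a => r.modify (d + 1) [] (fun l => l ++ [a])) r
        (pvInnerC (rd.getD name []) vn va [] []).2.2.1)
      (pvInnerC (rd.getD name []) vn va [] []).1
      (pvInnerC (rd.getD name []) vn va [] []).2.1
      (M ++ (pvInnerC (rd.getD name []) vn va [] []).2.2.2)
    simp only [List.append_assoc, ← List.map_append] at this ⊢
    rw [this]
    simp [List.foldl_append]

-- a sub-predicate filter is strictly shorter when some element passes only the weaker one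
theorem pv_filter_lt {α} {p q : α → Bool} (himp : ∀ x, q x = true → p x = true) :
    ∀ (l : List α) (a : α), a ∈ l → p a = true → q a = false →
      (l.filter q).length < (l.filter p).length := by
  intro l
  induction l with
  | nil => intro a ha; simp at ha
  | cons b l ih =>
    intro a ha hpa hqa
    have hmono := (List.monotone_filter_right l (fun x hx => himp x (by simpa using hx))).length_le
    rcases List.mem_cons.mp ha with rfl | hal
    · simp [hpa, hqa]
      omega
    · rcases hq : q b with _ | _
      · rcases hp : p b with _ | _
        · simpa [List.filter_cons, hq, hp] using ih a hal hpa hqa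
        · have := ih a hal hpa hqa; simp [hq, hp]; omega
      · have hp := himp b hq
        have := ih a hal hpa hqa; simp [hq, hp]; omega

-- contains is monotone under add
theorem pv_contains_add_mono (s : PySem.Set String) (x y : String) (h : s.contains y = true) :
    (PySem.Set.add s x).contains y = true := by
  simp only [PySem.Set.add, PySem.Set.contains, List.contains_eq_mem, decide_eq_true_eq] at *
  split_ifs with hx
  · exact h
  · simp [h]

-- every address the lookup returns is in the graph
theorem pv_mem_getD (rd : PySem.Dict String (List String)) (name : String) :
    ∀ a ∈ rd.getD name [], a ∈ rd.values.flatten := by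
  obtain ⟨l⟩ := rd
  induction l with
  | nil =>
    intro a ha
    simp [PySem.Dict.getD_eq_get?_getD, PySem.Dict.get?] at ha
  | cons p rest ih =>
    intro a ha
    obtain ⟨k, v⟩ := p
    rw [PySem.Dict.getD_eq_get?_getD, PySem.Dict.get?_mk_cons] at ha
    simp only [PySem.Dict.values_mk, List.map_cons, List.flatten_cons, List.mem_append]
    split_ifs at ha with hk
    · left; simpa using ha
    · right
      have := ih a (by rw [PySem.Dict.getD_eq_get?_getD]; exact ha)
      simpa [PySem.Dict.values_mk] using this

-- the measure drops by at least the number of fresh names B's inner loop produces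
theorem pvCnt_innerC (rd : PySem.Dict String (List String)) (cs : List String) :
    ∀ sn sa, (∀ a ∈ cs, a ∈ rd.values.flatten) →
      pvCnt rd (pvInnerC cs sn sa [] []).1 + (pvInnerC cs sn sa [] []).2.2.2.length ≤
        pvCnt rd sn := by
  induction cs with
  | nil => intro sn sa _; simp [pvInnerC]
  | cons addr cs ih =>
    intro sn sa hmem
    have hmem' : ∀ a ∈ cs, a ∈ rd.values.flatten := fun a ha => hmem a (List.mem_cons_of_mem _ ha)
    simp only [pvInnerC]
    split_ifs with h1 h2
    · exact ih sn sa hmem'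
    · rw [pvInnerC_acc cs _ _ ([] ++ [addr]) []]
      simpa using ih sn (PySem.Set.add sa addr) hmem'
    · rw [pvInnerC_acc cs _ _ ([] ++ [addr]) ([] ++ [pvName addr])]
      simp only [List.nil_append, List.length_append, List.length_cons, List.length_nil]
      have hstep : pvCnt rd (PySem.Set.add sn (pvName addr)) + 1 ≤ pvCnt rd sn := by
        have := pv_filter_lt
          (p := fun a => !(PySem.Set.contains sn (pvName a)))
          (q := fun a => !(PySem.Set.contains (PySem.Set.add sn (pvName addr)) (pvName a)))
          (fun x hx => by
            simp only [Bool.not_eq_true'] at hx ⊢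
            rcases h : PySem.Set.contains sn (pvName x) with _ | _
            · rfl
            · exact absurd (pv_contains_add_mono sn (pvName addr) (pvName x) h)
                (by rw [hx]; simp))
          (rd.values.flatten) addr (hmem addr (List.mem_cons_self))
          (by simpa using h2) (by simp [PySem.Set.mem_add])
        unfold pvCnt
        omega
      have hih := ih (PySem.Set.add sn (pvName addr)) (PySem.Set.add sa addr) hmem'
      rcases hI : pvInnerC cs (PySem.Set.add sn (pvName addr)) (PySem.Set.add sa addr) [] []
        with ⟨sn1, sa1, a1, n1⟩
      rw [hI] at hih
      simp only at hih ⊢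
      omega

theorem pvCnt_gather (rd : PySem.Dict String (List String)) (F : List String) :
    ∀ sn sa,
      pvCnt rd (pvGather rd F sn sa [] []).1 + (pvGather rd F sn sa [] []).2.2.2.length ≤
        pvCnt rd sn := by
  induction F with
  | nil => intro sn sa; simp [pvGather]
  | cons name rest ih =>
    intro sn sa
    simp only [pvGather]
    have h1 := pvCnt_innerC rd (rd.getD name []) sn sa (pv_mem_getD rd name)
    rcases hI : pvInnerC (rd.getD name []) sn sa [] [] with ⟨sn1, sa1, a1, n1⟩
    rw [hI] at h1
    simp only at h1
    rw [pvGather_acc rd rest sn1 sa1 a1 n1]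
    have h2 := ih sn1 sa1
    rcases hL : pvGather rd rest sn1 sa1 [] [] with ⟨sn2, sa2, a2, n2⟩
    rw [hL] at h2
    simp only at h2 ⊢
    simp only [List.length_append]
    omega

-- no fresh address ⇒ no fresh name (B's inner/level loops)
theorem pvInnerC_len (cs : List String) :
    ∀ sn sa, (pvInnerC cs sn sa [] []).2.2.2.length ≤ (pvInnerC cs sn sa [] []).2.2.1.length := by
  induction cs with
  | nil => intro sn sa; simp [pvInnerC]
  | cons a cs ih =>
    intro sn sa
    simp only [pvInnerC]
    split_ifs with h1 h2
    · exact ih sn sa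
    · rw [pvInnerC_acc cs _ _ ([] ++ [a]) []]
      have := ih sn (PySem.Set.add sa a)
      simp only [List.nil_append, List.length_append, List.length_cons, List.length_nil]
      omega
    · rw [pvInnerC_acc cs _ _ ([] ++ [a]) ([] ++ [pvName a])]
      have := ih (PySem.Set.add sn (pvName a)) (PySem.Set.add sa a)
      simp only [List.nil_append, List.length_append, List.length_cons, List.length_nil]
      omega

theorem pvGather_len (rd : PySem.Dict String (List String)) (F : List String) :
    ∀ sn sa, (pvGather rd F sn sa [] []).2.2.2.length ≤ (pvGather rd F sn sa [] []).2.2.1.length := by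
  induction F with
  | nil => intro sn sa; simp [pvGather]
  | cons name rest ih =>
    intro sn sa
    simp only [pvGather]
    rcases hI : pvInnerC (rd.getD name []) sn sa [] [] with ⟨sn1, sa1, a1, n1⟩
    have h1 := pvInnerC_len (rd.getD name []) sn sa
    rw [hI] at h1; simp only at h1
    rw [pvGather_acc rd rest sn1 sa1 a1 n1]
    have h2 := ih sn1 sa1
    simp only [List.length_append]
    omega

-- items of a dict all of whose keys are < k : find? fails
theorem pv_find_none (k : Int) (l : List (Int × List String)) (h : ∀ p ∈ l, p.1 < k) :
    List.find? (fun p => p.1 == k) l = none := by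
  rw [List.find?_eq_none]
  intro p hp
  have := h p hp
  simp only [beq_iff_eq]
  omega

-- folding `modify k [] (· ++ [a])` over a nonempty list, all existing keys < k,
-- appends exactly one entry (k, addrs) at the end
theorem pvFoldModify_go (addrs : List String) (k : Int) :
    ∀ (pre : List (Int × List String)) (cur : List String), (∀ p ∈ pre, p.1 < k) →
      (List.foldl (fun r a => PySem.Dict.modify r k [] (fun l => l ++ [a]))
        (PySem.Dict.mk (pre ++ [(k, cur)])) addrs).items = pre ++ [(k, cur ++ addrs)] := by
  induction addrs with
  | nil => intro pre cur _; simp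
  | cons a addrs ih =>
    intro pre cur hlt
    simp only [List.foldl_cons]
    have hmod : PySem.Dict.modify (PySem.Dict.mk (pre ++ [(k, cur)])) k [] (fun l => l ++ [a]) =
        PySem.Dict.mk (pre ++ [(k, cur ++ [a])]) := by
      apply PySem.Dict.ext
      simp only [PySem.Dict.modify, PySem.Dict.insert, PySem.Dict.contains, PySem.Dict.getD,
        PySem.Dict.get?]
      have hfind : List.find? (fun p => p.1 == k) (pre ++ [(k, cur)]) = some (k, cur) := by
        rw [List.find?_append, pv_find_none k pre hlt]
        simp
      rw [if_pos (by simp)]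
      simp only [hfind]
      rw [List.map_append]
      congr 1
      · conv_rhs => rw [← List.map_id pre]
        apply List.map_congr_left
        intro p hp
        have := hlt p hp
        simp only [beq_iff_eq, id]
        rw [if_neg (by omega)]
      · simp
    rw [hmod]
    simpa using ih pre (cur ++ [a]) hlt

theorem pvFoldModify_items (addrs : List String) (k : Int) (r : PySem.Dict Int (List String))
    (hlt : ∀ p ∈ r.items, p.1 < k) (hne : addrs ≠ []) :
    (List.foldl (fun r a => PySem.Dict.modify r k [] (fun l => l ++ [a])) r addrs).items =
      r.items ++ [(k, addrs)] := by
  cases addrs with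
  | nil => exact absurd rfl hne
  | cons a addrs =>
    simp only [List.foldl_cons]
    have hmod : PySem.Dict.modify r k [] (fun l => l ++ [a]) =
        PySem.Dict.mk (r.items ++ [(k, [a])]) := by
      apply PySem.Dict.ext
      simp only [PySem.Dict.modify, PySem.Dict.insert, PySem.Dict.contains, PySem.Dict.getD,
        PySem.Dict.get?]
      rw [if_neg, pv_find_none k r.items hlt]
      · simp
      · simp only [List.any_eq_true, not_exists, not_and]
        intro p hp
        have := hlt p hp
        simp only [beq_iff_eq]
        omega
    rw [hmod]
    have := pvFoldModify_go addrs k r.items [a] hlt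
    simpa using this

-- building the dict from enumerate(lv, start=1): fresh increasing keys just append
theorem pvEnumFold (L : List (List String)) :
    ∀ (s : Int) (d : PySem.Dict Int (List String)), (∀ p ∈ d.items, p.1 < s) →
      ((PySem.List.enumerate L s).foldl (fun d p => d.insert p.1 p.2) d).items =
        d.items ++ PySem.List.enumerate L s := by
  induction L with
  | nil => intro s d _; simp [PySem.List.enumerate]
  | cons x xs ih =>
    intro s d hlt
    rw [PySem.List.enumerate_cons]
    simp only [List.foldl_cons]
    have hins : d.insert s x = PySem.Dict.mk (d.items ++ [(s, x)]) := by
      apply PySem.Dict.ext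
      simp only [PySem.Dict.insert, PySem.Dict.contains]
      rw [if_neg]
      simp only [List.any_eq_true, not_exists, not_and]
      intro p hp
      have := hlt p hp
      simp only [beq_iff_eq]
      omega
    rw [hins, ih (s + 1) _ (by
      intro p hp
      simp only at hp
      rcases List.mem_append.mp hp with h | h
      · have := hlt p h; omega
      · simp only [List.mem_singleton] at h
        subst h
        dsimp only
        omega)]
    simp

-- the bridge: A's queue loop, started at one level's worth of queue, produces exactly
-- the enumeration of B's remaining levels appended to the dict built so far
theorem pvBridge (rd : PySem.Dict String (List String)) (md : Int) :
    ∀ fB F r vn va (d : Int) fA, F.length + pvCnt rd vn ≤ fA → pvCnt rd vn + 1 ≤ fB →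
      (md ≤ 0 ∨ d < md) → 0 ≤ d → (∀ p ∈ r.items, p.1 < d + 1) →
      (pvLoopA rd md fA r vn va (F.map (fun n => (n, d)))).items =
        r.items ++ PySem.List.enumerate (pvLevels rd fB F vn va (md - d)) (d + 1) := by
  intro fB
  induction fB with
  | zero => intro F r vn va d fA h1 h2; omega
  | succ f ih =>
    intro F r vn va d fA h1 h2 hgo hd0 hlt
    cases F with
    | nil =>
      have hA : pvLoopA rd md fA r vn va [] = r := by cases fA <;> simp [pvLoopA]
      simp [hA, pvLevels, pvGather]
    | cons name F' =>
      obtain ⟨g, hg⟩ : ∃ g, fA = (name :: F').length + g :=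
        ⟨fA - (name :: F').length, by simp at h1 ⊢; omega⟩
      subst hg
      have hd := pvLoopA_drain_go rd md d hgo (name :: F') g r vn va []
      simp only [List.map_nil, List.append_nil, List.nil_append] at hd
      rw [hd]
      have hc := pvCnt_gather rd (name :: F') vn va
      have hlen := pvGather_len rd (name :: F') vn va
      rcases hG : pvGather rd (name :: F') vn va [] [] with ⟨sn, sa, addrs, nms⟩
      rw [hG] at hc hlen
      dsimp only at hc hlen ⊢
      simp only [pvLevels, hG]
      cases haddrs : addrs with
      | nil =>
        have hnms : nms = [] := by
          rw [haddrs] at hlen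
          simpa using hlen
        subst hnms
        simp only [List.foldl_nil, List.map_nil]
        have : pvLoopA rd md g r sn sa [] = r := by cases g <;> simp [pvLoopA]
        simp [this]
      | cons a0 as0 =>
        rw [← haddrs]
        have haddne : addrs ≠ [] := by rw [haddrs]; simp
        have hitems := pvFoldModify_items addrs (d + 1)
          r hlt haddne
        by_cases hrem : md - d = 1
        · -- B emits this level and stops; A skips everything at depth d+1 = md
          have hstop : ¬ (md ≤ 0 ∨ (d + 1 : Int) < md) := by omega
          have := pvLoopA_drain_skip rd md (d + 1) hstop nms (g - nms.length)
            (List.foldl (fun r a => PySem.Dict.modify r (d+1) [] (fun l => l ++ [a])) r addrs)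
            sn sa
          have hfuel : nms.length + (g - nms.length) = g := by
            simp at h1; omega
          rw [hfuel] at this
          rw [this, if_neg (by rw [haddrs]; simp), if_pos hrem, hitems]
          simp [PySem.List.enumerate]
        · -- B recurses; A continues with the next level's queue
          rw [if_neg (by rw [haddrs]; simp), if_neg hrem]
          have hgo' : md ≤ 0 ∨ (d + 1 : Int) < md := by omega
          have hlt' : ∀ p ∈ (List.foldl (fun r a => PySem.Dict.modify r (d+1) []
              (fun l => l ++ [a])) r addrs).items, p.1 < (d + 1) + 1 := by
            rw [hitems]
            intro p hp
            rcases List.mem_append.mp hp with h | h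
            · have := hlt p h; omega
            · simp only [List.mem_singleton] at h
              subst h
              dsimp only
              omega
          cases hnms : nms with
          | nil =>
            -- no fresh names: A's queue is empty after this level, B's recursion yields []
            have hL : pvLevels rd f ([] : List String) sn sa (md - d - 1) = [] := by
              cases f <;> simp [pvLevels, pvGather]
            simp only [List.map_nil]
            have hA : pvLoopA rd md g
                (List.foldl (fun r a => PySem.Dict.modify r (d+1) [] (fun l => l ++ [a])) r addrs)
                sn sa [] =
                List.foldl (fun r a => PySem.Dict.modify r (d+1) [] (fun l => l ++ [a])) r addrs := by
              cases g <;> simp [pvLoopA]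
            rw [hA, hitems, hL]
            simp [PySem.List.enumerate]
          | cons n0 nrest =>
            have hn1 : 1 ≤ nms.length := by rw [hnms]; simp
            rw [← hnms]
            have := ih nms
              (List.foldl (fun r a => PySem.Dict.modify r (d+1) [] (fun l => l ++ [a])) r addrs)
              sn sa (d + 1) g (by simp at h1; omega) (by omega) hgo' (by omega) hlt'
            rw [this, hitems]
            have : md - d - 1 = md - (d + 1) := by omega
            rw [PySem.List.enumerate_cons]
            simp [this]

-- ===== VERDICT (by name: the statement is the Claim_ definition above) =====
theorem transitive_callers_spec : Claim_equal_transitive_callers := by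
  intro s reverse md _
  unfold Spec_transitive_callers transitive_callers transitive_callers_alt
  have hcnt : pvCnt (PySem.Dict.mk reverse) (PySem.Set.ofList [s]) + 1 ≤ pvFuel reverse := by
    unfold pvCnt pvFuel
    have := List.length_filter_le (fun a => !(PySem.Set.contains (PySem.Set.ofList [s]) (pvName a)))
      ((PySem.Dict.mk reverse).values.flatten)
    simp only [PySem.Dict.values_mk] at this ⊢
    omega
  have hb := pvBridge (PySem.Dict.mk reverse) md (pvFuel reverse) [s]
    PySem.Dict.empty (PySem.Set.ofList [s]) PySem.Set.empty 0 (pvFuel reverse)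
    (by simp at hcnt ⊢; omega) (by omega) (by omega) (by omega) (by simp [PySem.Dict.empty])
  rw [pvEnumFold _ 1 PySem.Dict.empty (by simp [PySem.Dict.empty])]
  simp only [PySem.Dict.empty] at hb ⊢
  simpa using hb
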